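-- pv_equiv track=rewrite | github.com/lingoWu/SSD | grammar.py | lgf2lf
-- ===== SOURCE A (Python) =====
-- alias = '''(def @domain edu.stanford.nlp.sempre.overnight.SimpleWorld.domain)
--     (def @singleton edu.stanford.nlp.sempre.overnight.SimpleWorld.singleton)
--     (def @filter edu.stanford.nlp.sempre.overnight.SimpleWorld.filter)
--     (def @getProperty edu.stanford.nlp.sempre.overnight.SimpleWorld.getProperty)
--     (def @superlative edu.stanford.nlp.sempre.overnight.SimpleWorld.superlative)
--     (def @countSuperlative edu.stanford.nlp.sempre.overnight.SimpleWorld.countSuperlative)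
--     (def @countComparative edu.stanford.nlp.sempre.overnight.SimpleWorld.countComparative)
--     (def @aggregate edu.stanford.nlp.sempre.overnight.SimpleWorld.aggregate)
--     (def @concat edu.stanford.nlp.sempre.overnight.SimpleWorld.concat)
--     (def @reverse edu.stanford.nlp.sempre.overnight.SimpleWorld.reverse)
--     (def @arithOp edu.stanford.nlp.sempre.overnight.SimpleWorld.arithOp)
--     (def @sortAndToString edu.stanford.nlp.sempre.overnight.SimpleWorld.sortAndToString)
--     (def @ensureNumericProperty edu.stanford.nlp.sempre.overnight.SimpleWorld.ensureNumericProperty)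
--     (def @ensureNumericEntity edu.stanford.nlp.sempre.overnight.SimpleWorld.ensureNumericEntity)
--     (def @listValue edu.stanford.nlp.sempre.overnight.SimpleWorld.listValue)'''
--
-- def lgf2lf(lgf):
--     for line in alias.strip().split('\n'):
--         _, k, v = line.strip().split()
--         lgf = lgf.replace(k, v[:-1])
--     lgf = lgf.strip()
--     if lgf.startswith('ConstantFn'):
--         lgf = lgf.replace('ConstantFn', '').strip()
--     if not lgf.startswith('('):
--         lgf = '( ' + lgf + ' )'
--     lgf = lgf.replace('(', ' ( ').replace(')', ' ) ')
--     lgf = ' '.join(lgf.strip().split())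
--     return lgf
-- ===== SOURCE B (Python) =====
-- alias = '''(def @domain edu.stanford.nlp.sempre.overnight.SimpleWorld.domain)
--     (def @singleton edu.stanford.nlp.sempre.overnight.SimpleWorld.singleton)
--     (def @filter edu.stanford.nlp.sempre.overnight.SimpleWorld.filter)
--     (def @getProperty edu.stanford.nlp.sempre.overnight.SimpleWorld.getProperty)
--     (def @superlative edu.stanford.nlp.sempre.overnight.SimpleWorld.superlative)
--     (def @countSuperlative edu.stanford.nlp.sempre.overnight.SimpleWorld.countSuperlative)
--     (def @countComparative edu.stanford.nlp.sempre.overnight.SimpleWorld.countComparative)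
--     (def @aggregate edu.stanford.nlp.sempre.overnight.SimpleWorld.aggregate)
--     (def @concat edu.stanford.nlp.sempre.overnight.SimpleWorld.concat)
--     (def @reverse edu.stanford.nlp.sempre.overnight.SimpleWorld.reverse)
--     (def @arithOp edu.stanford.nlp.sempre.overnight.SimpleWorld.arithOp)
--     (def @sortAndToString edu.stanford.nlp.sempre.overnight.SimpleWorld.sortAndToString)
--     (def @ensureNumericProperty edu.stanford.nlp.sempre.overnight.SimpleWorld.ensureNumericProperty)
--     (def @ensureNumericEntity edu.stanford.nlp.sempre.overnight.SimpleWorld.ensureNumericEntity)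
--     (def @listValue edu.stanford.nlp.sempre.overnight.SimpleWorld.listValue)'''
--
-- # the alias table, parsed once at import time into a list of (shorthand, full name) pairs
-- _ALIASES = []
-- for _line in alias.strip().split('\n'):
--     _parts = _line.split()
--     _ALIASES.append((_parts[1], _parts[2][:-1]))
--
--
-- def _tokens(s):
--     """Single-pass tokenizer: '(' and ')' are standalone tokens, whitespace separates words."""
--     toks, word = [], []
--     for c in s:
--         if c in '()':
--             if word:
--                 toks.append(''.join(word))
--                 word = []
--             toks.append(c)
--         elif c.isspace():
--             if word:
--                 toks.append(''.join(word))
--                 word = []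
--         else:
--             word.append(c)
--     if word:
--         toks.append(''.join(word))
--     return toks
--
--
-- def lgf2lf(lgf):
--     for k, v in _ALIASES:
--         lgf = lgf.replace(k, v)
--     s = lgf.strip()
--     if s.startswith('ConstantFn'):
--         s = s.replace('ConstantFn', '').strip()
--     toks = _tokens(s)
--     if not toks or toks[0] != '(':
--         toks = ['('] + toks + [')']
--     return ' '.join(toks)
-- ===== Notes on version B (the rewrite author's own statement) =====
-- stated objective: idiomatic
-- what changed: The alias table is parsed once at import time into a key-value pair list, and A's string-surgery tokenization (wrap, pad parentheses via replace, strip, split, join) is replaced by a single-pass character tokenizer that emits parenthesis and word tokens directly and wraps the token list instead of the string.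
import Mathlib
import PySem

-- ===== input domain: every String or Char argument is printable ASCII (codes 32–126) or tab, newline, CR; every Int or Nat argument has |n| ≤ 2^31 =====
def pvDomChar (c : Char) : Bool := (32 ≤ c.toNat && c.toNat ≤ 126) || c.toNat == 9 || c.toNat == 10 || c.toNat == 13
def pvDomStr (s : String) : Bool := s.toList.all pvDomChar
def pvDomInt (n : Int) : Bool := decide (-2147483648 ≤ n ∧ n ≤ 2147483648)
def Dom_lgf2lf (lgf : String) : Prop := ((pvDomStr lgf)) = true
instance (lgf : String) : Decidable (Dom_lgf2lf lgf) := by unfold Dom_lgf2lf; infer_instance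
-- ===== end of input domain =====

-- B parses the alias table once into a pair list and replaces A's string-surgery tokenization
-- (wrap, pad parentheses with replace, strip, split, join) by a single-pass character tokenizer.

-- the module-level `alias` constant, shared by both programs
def pvAlias : String := "(def @domain edu.stanford.nlp.sempre.overnight.SimpleWorld.domain)\n    (def @singleton edu.stanford.nlp.sempre.overnight.SimpleWorld.singleton)\n    (def @filter edu.stanford.nlp.sempre.overnight.SimpleWorld.filter)\n    (def @getProperty edu.stanford.nlp.sempre.overnight.SimpleWorld.getProperty)\n    (def @superlative edu.stanford.nlp.sempre.overnight.SimpleWorld.superlative)\n    (def @countSuperlative edu.stanford.nlp.sempre.overnight.SimpleWorld.countSuperlative)\n    (def @countComparative edu.stanford.nlp.sempre.overnight.SimpleWorld.countComparative)\n    (def @aggregate edu.stanford.nlp.sempre.overnight.SimpleWorld.aggregate)\n    (def @concat edu.stanford.nlp.sempre.overnight.SimpleWorld.concat)\n    (def @reverse edu.stanford.nlp.sempre.overnight.SimpleWorld.reverse)\n    (def @arithOp edu.stanford.nlp.sempre.overnight.SimpleWorld.arithOp)\n    (def @sortAndToString edu.stanford.nlp.sempre.overnight.SimpleWorld.sortAndToString)\n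    (def @ensureNumericProperty edu.stanford.nlp.sempre.overnight.SimpleWorld.ensureNumericProperty)\n    (def @ensureNumericEntity edu.stanford.nlp.sempre.overnight.SimpleWorld.ensureNumericEntity)\n    (def @listValue edu.stanford.nlp.sempre.overnight.SimpleWorld.listValue)"

-- ===== PORT A =====
-- one iteration of A's loop: `_, k, v = line.strip().split(); lgf = lgf.replace(k, v[:-1])`
def lgf2lfStep (acc : String) (line : String) : String :=
  match PySem.Str.split₀ (PySem.Str.strip line) with
  | [_, k, v] => PySem.Str.replace acc k (PySem.Str.slice v none (some (-1)))
  | _ => acc   -- unreachable: every alias line splits into exactly three words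

def lgf2lf (lgf : String) : String :=
  let lgf1 := ((PySem.Str.split? (PySem.Str.strip pvAlias) "\n").getD []).foldl lgf2lfStep lgf
  let lgf2 := PySem.Str.strip lgf1
  let lgf3 := if PySem.Str.startswith lgf2 "ConstantFn" then
      PySem.Str.strip (PySem.Str.replace lgf2 "ConstantFn" "") else lgf2
  let lgf4 := if !PySem.Str.startswith lgf3 "(" then "( " ++ lgf3 ++ " )" else lgf3
  let lgf5 := PySem.Str.replace (PySem.Str.replace lgf4 "(" " ( ") ")" " ) "
  PySem.Str.join " " (PySem.Str.split₀ (PySem.Str.strip lgf5))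

-- ===== PORT B =====
-- Source B module level: the alias table parsed once into the pair list _ALIASES
def pvAliasPairs : List (String × String) :=
  ((PySem.Str.split? (PySem.Str.strip pvAlias) "\n").getD []).foldl
    (fun ps line =>
      match PySem.Str.split₀ line with
      | [_, k, v] => ps ++ [(k, PySem.Str.slice v none (some (-1)))]
      | _ => ps)   -- unreachable: every alias line splits into exactly three words
    []

-- Source B `_tokens`: single pass over the characters, `word`/`toks` as in the Python
def altTokens : List Char → List Char → List String → List String
  | [], word, toks => if word.isEmpty then toks else toks ++ [String.ofList word]
  | c :: rest, word, toks =>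
    if c = '(' || c = ')' then
      altTokens rest [] ((if word.isEmpty then toks else toks ++ [String.ofList word]) ++ [String.ofList [c]])
    else if PySem.Chars.isspace c then
      altTokens rest [] (if word.isEmpty then toks else toks ++ [String.ofList word])
    else
      altTokens rest (word ++ [c]) toks

def lgf2lf_alt (lgf : String) : String :=
  let e := pvAliasPairs.foldl (fun acc kv => PySem.Str.replace acc kv.1 kv.2) lgf
  let s := PySem.Str.strip e
  let s := if PySem.Str.startswith s "ConstantFn" then
      PySem.Str.strip (PySem.Str.replace s "ConstantFn" "") else s
  let toks := altTokens s.toList [] []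
  let toks := match toks with
    | [] => ["(", ")"]
    | t :: _ => if t = "(" then toks else "(" :: (toks ++ [")"])
  PySem.Str.join " " toks

-- ===== PRECONDITION & SPEC =====
def Spec_lgf2lf (lgf : String) (out : String) : Prop := out = lgf2lf_alt lgf
instance (lgf : String) (out : String) : Decidable (Spec_lgf2lf lgf out) := by unfold Spec_lgf2lf; infer_instance

-- ===== CLAIM (what is proved, stated in full; the proofs are below) =====
def Claim_equal_lgf2lf : Prop := ∀ (lgf : String), Dom_lgf2lf lgf → Spec_lgf2lf lgf (lgf2lf lgf)

-- ===== LEMMAS AND PROOFS =====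

-- A's per-character padding of parentheses, as one map over the characters
def pvPadC (c : Char) : List Char :=
  if c = '(' then [' ', '(', ' '] else if c = ')' then [' ', ')', ' '] else [c]

-- pure (accumulator-free) model of Chars.split₀.go: cur is the reversed current word
def pvWm : List Char → List Char → List (List Char)
  | [], cur => if cur.isEmpty then [] else [cur.reverse]
  | c :: t, cur =>
    if PySem.Chars.isspace c then
      (if cur.isEmpty then pvWm t [] else cur.reverse :: pvWm t [])
    else pvWm t (c :: cur)

lemma head?_dropWhile_false (p : Char → Bool) (l : List Char) (c : Char)
    (h : (l.dropWhile p).head? = some c) : p c = false := by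
  induction l with
  | nil => simp at h
  | cons a t ih =>
    by_cases hp : p a
    · rw [List.dropWhile_cons_of_pos hp] at h; exact ih h
    · rw [List.dropWhile_cons_of_neg hp] at h; simp at h; subst h; simpa using hp

lemma replace_single_go (a : Char) (new : List Char) :
    ∀ (l acc : List Char), PySem.Chars.replace.go [a] new l.length l acc
      = acc.reverse ++ l.flatMap (fun c => if c = a then new else [c]) := by
  intro l
  induction l with
  | nil => intro acc; simp [PySem.Chars.replace.go]
  | cons c t ih =>
    intro acc
    show PySem.Chars.replace.go [a] new (t.length + 1) (c :: t) acc = _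
    rw [PySem.Chars.replace.go]
    by_cases hc : c = a
    · subst hc
      rw [if_pos (show [c].isPrefixOf (c :: t) = true by simp [List.isPrefixOf])]
      have hdrop : List.drop ([c].length) (c :: t) = t := by simp
      rw [hdrop, ih]
      simp
    · rw [if_neg (by simp [List.isPrefixOf]; exact fun h => absurd h.symm hc)]
      rw [ih]
      simp [hc]

lemma replace_single (a : Char) (new cs : List Char) :
    PySem.Chars.replace cs [a] new = cs.flatMap (fun c => if c = a then new else [c]) := by
  rw [PySem.Chars.replace]
  simp only [List.isEmpty_cons, Bool.false_eq_true, if_false]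
  simpa using replace_single_go a new cs []

lemma pad_eq (cs : List Char) :
    PySem.Chars.replace (PySem.Chars.replace cs ['('] [' ', '(', ' ']) [')'] [' ', ')', ' ']
      = cs.flatMap pvPadC := by
  rw [replace_single, replace_single, List.flatMap_assoc]
  apply List.flatMap_congr
  intro c _
  by_cases h1 : c = '('
  · subst h1; rfl
  · by_cases h2 : c = ')'
    · subst h2; rfl
    · simp [pvPadC, h1, h2]

lemma split₀_go_eq : ∀ (l cur : List Char) (acc : List (List Char)),
    PySem.Chars.split₀.go l cur acc = acc.reverse ++ pvWm l cur := by
  intro l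
  induction l with
  | nil =>
    intro cur acc
    rw [PySem.Chars.split₀.go, pvWm]
    by_cases h : cur.isEmpty <;> simp [h]
  | cons c t ih =>
    intro cur acc
    rw [PySem.Chars.split₀.go, pvWm]
    by_cases hws : PySem.Chars.isspace c
    · by_cases hcur : cur.isEmpty <;> simp [hws, hcur, ih]
    · simp [hws, ih]

lemma split₀_eq_Wm (l : List Char) : PySem.Chars.split₀ l = pvWm l [] := by
  rw [PySem.Chars.split₀]
  simpa using split₀_go_eq l [] []

lemma Wm_ws_all : ∀ (ws cur : List Char), (∀ c ∈ ws, PySem.Chars.isspace c = true) →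
    pvWm ws cur = if cur.isEmpty then [] else [cur.reverse] := by
  intro ws
  induction ws with
  | nil => intro cur _; rfl
  | cons c t ih =>
    intro cur h
    have hc : PySem.Chars.isspace c = true := h c (by simp)
    have ht : ∀ c ∈ t, PySem.Chars.isspace c = true := fun x hx => h x (by simp [hx])
    rw [pvWm]
    by_cases hcur : cur.isEmpty <;> simp [hc, hcur, ih [] ht]

lemma Wm_append_ws : ∀ (s ws cur : List Char), (∀ c ∈ ws, PySem.Chars.isspace c = true) →
    pvWm (s ++ ws) cur = pvWm s cur := by
  intro s
  induction s with
  | nil =>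
    intro ws cur h
    rw [List.nil_append, Wm_ws_all ws cur h, pvWm]
  | cons c t ih =>
    intro ws cur h
    rw [List.cons_append, pvWm, pvWm]
    by_cases hws : PySem.Chars.isspace c
    · by_cases hcur : cur.isEmpty <;> simp [hws, hcur, ih ws [] h]
    · simp [hws, ih ws (c :: cur) h]

lemma Wm_lstrip : ∀ (s : List Char), pvWm (s.dropWhile PySem.Chars.isspace) [] = pvWm s [] := by
  intro s
  induction s with
  | nil => rfl
  | cons c t ih =>
    by_cases hws : PySem.Chars.isspace c
    · rw [List.dropWhile_cons_of_pos hws, ih, pvWm]; simp [hws]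
    · rw [List.dropWhile_cons_of_neg hws]

lemma split₀_strip (s : List Char) : PySem.Chars.split₀ (PySem.Chars.strip s) = PySem.Chars.split₀ s := by
  rw [split₀_eq_Wm, split₀_eq_Wm, PySem.Chars.strip, PySem.Chars.rstrip, PySem.Chars.lstrip]
  set y := s.dropWhile PySem.Chars.isspace with hy
  have hdecomp : y = (y.reverse.dropWhile PySem.Chars.isspace).reverse
      ++ (y.reverse.takeWhile PySem.Chars.isspace).reverse := by
    have := List.takeWhile_append_dropWhile (p := PySem.Chars.isspace) (l := y.reverse)
    conv_lhs => rw [← List.reverse_reverse y, ← this]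
    rw [List.reverse_append]
  have hws : ∀ c ∈ (y.reverse.takeWhile PySem.Chars.isspace).reverse, PySem.Chars.isspace c = true := by
    intro c hc
    exact List.mem_takeWhile_imp (List.mem_reverse.mp hc)
  calc pvWm (y.reverse.dropWhile PySem.Chars.isspace).reverse []
      = pvWm ((y.reverse.dropWhile PySem.Chars.isspace).reverse
          ++ (y.reverse.takeWhile PySem.Chars.isspace).reverse) [] := by
        rw [Wm_append_ws _ _ [] hws]
    _ = pvWm y [] := by rw [← hdecomp]
    _ = pvWm s [] := Wm_lstrip s

-- pure (accumulator-free) model of altTokens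
def pvTA : List Char → List Char → List String
  | [], word => if word.isEmpty then [] else [String.ofList word]
  | c :: rest, word =>
    if c = '(' || c = ')' then
      (if word.isEmpty then [] else [String.ofList word]) ++ [String.ofList [c]] ++ pvTA rest []
    else if PySem.Chars.isspace c then
      (if word.isEmpty then [] else [String.ofList word]) ++ pvTA rest []
    else pvTA rest (word ++ [c])

lemma altTokens_eq_TA : ∀ (cs word : List Char) (toks : List String),
    altTokens cs word toks = toks ++ pvTA cs word := by
  intro cs
  induction cs with
  | nil =>
    intro word toks
    rw [altTokens, pvTA]
    by_cases h : word.isEmpty <;> simp [h]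
  | cons c rest ih =>
    intro word toks
    rw [altTokens, pvTA]
    by_cases h1 : (c = '(' || c = ')') = true
    · simp only [h1, if_true]
      by_cases h : word.isEmpty <;> simp [h, ih]
    · simp only [Bool.not_eq_true] at h1
      simp only [h1, Bool.false_eq_true, if_false]
      by_cases h2 : PySem.Chars.isspace c
      · simp only [h2, if_true]
        by_cases h : word.isEmpty <;> simp [h, ih]
      · simp only [h2, Bool.false_eq_true, if_false]
        rw [ih]

lemma TA_append_close : ∀ (cs word : List Char),
    pvTA (cs ++ [' ', ')']) word = pvTA cs word ++ [")"] := by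
  intro cs
  induction cs with
  | nil =>
    intro word
    rw [List.nil_append]
    by_cases h : word.isEmpty <;> simp [pvTA, h] <;> rfl
  | cons c rest ih =>
    intro word
    rw [List.cons_append, pvTA, pvTA]
    by_cases h1 : (c = '(' || c = ')') = true
    · simp [h1, ih]
    · simp only [Bool.not_eq_true] at h1
      simp only [h1, Bool.false_eq_true, if_false]
      by_cases h2 : PySem.Chars.isspace c
      · simp [h2, ih]
      · simp [h2, ih]

lemma TA_head : ∀ (cs word : List Char), word ≠ [] →
    ∃ r rest, pvTA cs word = String.ofList (word ++ r) :: rest := by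
  intro cs
  induction cs with
  | nil =>
    intro word hw
    refine ⟨[], [], ?_⟩
    rw [pvTA, if_neg (by simpa using hw)]
    simp
  | cons c rest ih =>
    intro word hw
    rw [pvTA]
    by_cases h1 : (c = '(' || c = ')') = true
    · refine ⟨[], String.ofList [c] :: pvTA rest [], ?_⟩
      simp [h1, if_neg (by simpa using hw)]
    · simp only [Bool.not_eq_true] at h1
      simp only [h1, Bool.false_eq_true, if_false]
      by_cases h2 : PySem.Chars.isspace c
      · exact ⟨[], pvTA rest [], by simp [h2, if_neg (by simpa using hw)]⟩
      · simp only [h2, Bool.false_eq_true, if_false]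
        obtain ⟨r, rest', hr⟩ := ih (word ++ [c]) (by simp)
        exact ⟨[c] ++ r, rest', by rw [hr]; simp⟩

-- the core simulation: split₀ of the padded stream = the single-pass tokenizer
lemma core : ∀ (cs cur : List Char),
    pvWm (cs.flatMap pvPadC) cur = (pvTA cs cur.reverse).map String.toList := by
  intro cs
  induction cs with
  | nil =>
    intro cur
    rw [List.flatMap_nil, pvWm, pvTA]
    by_cases h : cur.isEmpty <;> simp [h]
  | cons c rest ih =>
    intro cur
    rw [List.flatMap_cons, pvTA]
    by_cases h1 : c = '(' ∨ c = ')'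
    · have hb : (decide (c = '(') || decide (c = ')')) = true := by
        rcases h1 with h | h <;> simp [h]
      have hnws : PySem.Chars.isspace c = false := by
        rcases h1 with h | h <;> · rw [h]; decide
      have hpad : pvPadC c = [' ', c, ' '] := by
        rcases h1 with h | h <;> · rw [h]; rfl
      rw [hpad]
      show pvWm (' ' :: c :: ' ' :: rest.flatMap pvPadC) cur = _
      rw [pvWm]
      simp only [show PySem.Chars.isspace ' ' = true from by decide, if_true]
      by_cases h : cur.isEmpty
      · rw [if_pos h, pvWm]
        simp only [hnws, Bool.false_eq_true, if_false]
        rw [pvWm]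
        simp only [show PySem.Chars.isspace ' ' = true from by decide, if_true]
        simp [h, ih [], hb]
      · rw [if_neg h, pvWm]
        simp only [hnws, Bool.false_eq_true, if_false]
        rw [pvWm]
        simp only [show PySem.Chars.isspace ' ' = true from by decide, if_true]
        simp [h, ih [], hb]
    · have hpad : pvPadC c = [c] := by
        rcases not_or.mp h1 with ⟨ha, hb⟩
        simp [pvPadC, ha, hb]
      rw [hpad]
      rw [if_neg (by simpa using h1)]
      show pvWm (c :: rest.flatMap pvPadC) cur = _
      rw [pvWm]
      by_cases h2 : PySem.Chars.isspace c
      · simp only [h2, if_true]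
        by_cases h : cur.isEmpty <;> simp [h, ih []]
      · simp only [h2, Bool.false_eq_true, if_false]
        rw [ih (c :: cur)]
        simp

lemma strip_head (x : List Char) :
    ∀ c, (PySem.Chars.strip x).head? = some c → PySem.Chars.isspace c = false := by
  intro c hc
  rw [PySem.Chars.strip, PySem.Chars.rstrip, PySem.Chars.lstrip] at hc
  set y := x.dropWhile PySem.Chars.isspace with hy
  have hpre : (y.reverse.dropWhile PySem.Chars.isspace).reverse <+: y := by
    have hsuf := List.dropWhile_suffix (l := y.reverse) PySem.Chars.isspace
    have := List.reverse_prefix.mpr hsuf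
    simpa using this
  obtain ⟨t, ht⟩ := hpre
  apply head?_dropWhile_false PySem.Chars.isspace x c
  rw [← hy]
  rcases hd : (y.reverse.dropWhile PySem.Chars.isspace).reverse with _ | ⟨a, r⟩
  · rw [hd] at hc; simp at hc
  · rw [hd] at hc ht
    simp at hc
    subst hc
    rw [← ht]
    rfl

-- the whole tail of both programs agrees on any string whose first character is not whitespace
lemma tail_eq (m : String)
    (hm : ∀ c, m.toList.head? = some c → PySem.Chars.isspace c = false) :
    PySem.Str.join " " (PySem.Str.split₀ (PySem.Str.strip
      (PySem.Str.replace (PySem.Str.replace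
        (if !PySem.Str.startswith m "(" then "( " ++ m ++ " )" else m) "(" " ( ") ")" " ) ")))
    = PySem.Str.join " " (match altTokens m.toList [] [] with
        | [] => ["(", ")"]
        | t :: _ => if t = "(" then altTokens m.toList [] []
                    else "(" :: (altTokens m.toList [] [] ++ [")"])) := by
  have key : ∀ (w : String),
      (PySem.Str.split₀ (PySem.Str.strip
        (PySem.Str.replace (PySem.Str.replace w "(" " ( ") ")" " ) "))).map String.toList
        = (pvTA w.toList []).map String.toList := by
    intro w
    rw [PySem.Str.split₀_map_toList, PySem.Str.toList_strip, split₀_strip,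
      PySem.Str.toList_replace, PySem.Str.toList_replace]
    rw [show (" ( " : String).toList = [' ', '(', ' '] from rfl,
        show (" ) " : String).toList = [' ', ')', ' '] from rfl,
        show ("(" : String).toList = ['('] from rfl,
        show (")" : String).toList = [')'] from rfl,
        pad_eq, split₀_eq_Wm]
    simpa using core w.toList []
  have halt : altTokens m.toList [] [] = pvTA m.toList [] := by
    rw [altTokens_eq_TA]; simp
  rw [String.ext_iff, PySem.Str.toList_join, PySem.Str.toList_join]
  refine congrArg (PySem.Chars.join (" ").toList) ?_
  by_cases h : PySem.Str.startswith m "(" = true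
  · -- m already starts with '(' : neither side wraps
    obtain ⟨t0, ht0⟩ : ['('] <+: m.toList := by
      apply (PySem.Chars.startswith_iff _ _).mp
      rw [PySem.Str.startswith_eq] at h
      exact h
    have hcons : m.toList = '(' :: t0 := by rw [← ht0]; rfl
    have hTA : pvTA m.toList [] = "(" :: pvTA t0 [] := by
      rw [hcons, pvTA, if_pos (by simp)]
      simp only [List.isEmpty_nil, if_true, List.nil_append]
      rw [show String.ofList ['('] = "(" from by decide]
      rfl
    have hmatch : (match altTokens m.toList [] [] with
        | [] => (["(", ")"] : List String)
        | t :: _ => if t = "(" then altTokens m.toList [] []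
                    else "(" :: (altTokens m.toList [] [] ++ [")"]))
        = altTokens m.toList [] [] := by
      rw [halt, hTA]
      simp
    rw [hmatch, halt]
    rw [show (if !PySem.Str.startswith m "(" then "( " ++ m ++ " )" else m) = m from by
      rw [h]; rfl]
    exact key m
  · -- m does not start with '(' : both sides wrap
    simp only [Bool.not_eq_true] at h
    rw [show (if !PySem.Str.startswith m "(" then "( " ++ m ++ " )" else m)
        = "( " ++ m ++ " )" from by rw [h]; rfl]
    have hw : ("( " ++ m ++ " )").toList = ('(' :: ' ' :: m.toList) ++ [' ', ')'] := by
      simp [String.toList_append]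
    have hWTA : pvTA ("( " ++ m ++ " )").toList [] = "(" :: (pvTA m.toList [] ++ [")"]) := by
      rw [hw, TA_append_close, pvTA, if_pos (by simp)]
      simp only [List.isEmpty_nil, if_true, List.nil_append]
      rw [pvTA, if_neg (by simp), if_pos (by decide)]
      simp only [List.isEmpty_nil, if_true, List.nil_append]
      rw [show String.ofList ['('] = "(" from by decide]
      simp
    have hnpre : ¬ (['('] <+: m.toList) := by
      intro hp
      apply Bool.true_eq_false.mp
      rw [← (PySem.Chars.startswith_iff m.toList ['(']).mpr hp]
      rw [← h, PySem.Str.startswith_eq]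
      rfl
    have hmatch : (match altTokens m.toList [] [] with
        | [] => (["(", ")"] : List String)
        | t :: _ => if t = "(" then altTokens m.toList [] []
                    else "(" :: (altTokens m.toList [] [] ++ [")"]))
        = "(" :: (pvTA m.toList [] ++ [")"]) := by
      rw [halt]
      rcases hc : m.toList with _ | ⟨c, ms⟩
      · rw [hc] at *
        simp [pvTA]
      · have hcw : PySem.Chars.isspace c = false := hm c (by rw [hc]; rfl)
        by_cases hpar : c = '(' ∨ c = ')'
        · rcases hpar with hp | hp
          · exact absurd (show ['('] <+: m.toList from ⟨ms, by rw [hc, hp]; rfl⟩) hnpre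
          · subst hp
            rw [pvTA, if_pos (by simp)]
            simp only [List.isEmpty_nil, if_true, List.nil_append]
            rw [show String.ofList [')'] = ")" from by decide]
            simp [show (")" : String) ≠ "(" from by decide]
        · have hb : ¬ ((decide (c = '(') || decide (c = ')')) = true) := by simpa using hpar
          rw [pvTA, if_neg hb, if_neg (by simp [hcw])]
          obtain ⟨r, rest', hr⟩ := TA_head ms [c] (by simp)
          rw [show ([] : List Char) ++ [c] = [c] from rfl, hr]
          have hne : String.ofList (c :: r) ≠ "(" := by
            intro heq
            have h2 : c :: r = ['('] := by simpa using congrArg String.toList heq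
            injection h2 with h2a _
            exact (not_or.mp hpar).1 h2a
          simp [hne]
    rw [hmatch]
    rw [key ("( " ++ m ++ " )"), hWTA]

lemma pairsAux_acc : ∀ (L : List String) (ps : List (String × String)),
    L.foldl (fun ps line =>
      match PySem.Str.split₀ line with
      | [_, k, v] => ps ++ [(k, PySem.Str.slice v none (some (-1)))]
      | _ => ps) ps
    = ps ++ L.foldl (fun ps line =>
      match PySem.Str.split₀ line with
      | [_, k, v] => ps ++ [(k, PySem.Str.slice v none (some (-1)))]
      | _ => ps) [] := by
  intro L
  induction L with
  | nil => intro ps; simp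
  | cons l L ih =>
    intro ps
    simp only [List.foldl_cons]
    rw [ih]
    conv_rhs => rw [ih]
    rcases h : PySem.Str.split₀ l with _ | ⟨a, _ | ⟨b, _ | ⟨c, _ | d⟩⟩⟩ <;> simp [h]

lemma toList_injective : Function.Injective String.toList := by
  intro a b h; exact String.ext_iff.mpr h

lemma str_split₀_strip (l : String) : PySem.Str.split₀ (PySem.Str.strip l) = PySem.Str.split₀ l := by
  apply List.map_injective_iff.mpr toList_injective
  rw [PySem.Str.split₀_map_toList, PySem.Str.split₀_map_toList, PySem.Str.toList_strip,
    split₀_strip]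

lemma expand_gen : ∀ (L : List String) (s : String),
    L.foldl lgf2lfStep s
      = (L.foldl (fun ps line =>
          match PySem.Str.split₀ line with
          | [_, k, v] => ps ++ [(k, PySem.Str.slice v none (some (-1)))]
          | _ => ps) []).foldl (fun acc kv => PySem.Str.replace acc kv.1 kv.2) s := by
  intro L
  induction L with
  | nil => intro s; rfl
  | cons l L ih =>
    intro s
    simp only [List.foldl_cons]
    rw [ih (lgf2lfStep s l)]
    conv_rhs => rw [pairsAux_acc]
    rw [List.foldl_append]
    congr 1
    rw [lgf2lfStep, str_split₀_strip]
    rcases h : PySem.Str.split₀ l with _ | ⟨a, _ | ⟨b, _ | ⟨c, _ | d⟩⟩⟩ <;> simp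

lemma expand_eq (s : String) :
    ((PySem.Str.split? (PySem.Str.strip pvAlias) "\n").getD []).foldl lgf2lfStep s
      = pvAliasPairs.foldl (fun acc kv => PySem.Str.replace acc kv.1 kv.2) s := by
  rw [pvAliasPairs, expand_gen]

-- ===== VERDICT (by name: the statement is the Claim_ definition above) =====
theorem lgf2lf_spec : Claim_equal_lgf2lf := by
  intro lgf _
  unfold Spec_lgf2lf
  simp only [lgf2lf, lgf2lf_alt]
  rw [expand_eq]
  have hs : ∀ (x : String) (c : Char), (PySem.Str.strip x).toList.head? = some c →
      PySem.Chars.isspace c = false := by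
    intro x c hc
    rw [PySem.Str.toList_strip] at hc
    exact strip_head x.toList c hc
  set e := pvAliasPairs.foldl (fun acc kv => PySem.Str.replace acc kv.1 kv.2) lgf with he
  by_cases hCF : PySem.Str.startswith (PySem.Str.strip e) "ConstantFn" = true
  · rw [if_pos hCF]
    exact tail_eq _ (hs _)
  · rw [if_neg hCF]
    exact tail_eq _ (hs _)
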